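-- pv_equiv track=rewrite | github.com/MTCherukara/BOLD_code | C_FABBER/preproc.py | split_filename
-- ===== SOURCE A (Python) =====
-- def split_filename(input_name):
--     """Split a string containing a filename into two strings, one of the directory, and the
--     other of just the file's name (and extension)"""
--     parts = input_name.split("/")
--
--     if len(parts) == 1:
--         out_dir  = "."
--     else:
--         out_dir = ""
--         for part in parts[:-1]:
--             out_dir += part + "/"
--
--     out_name = parts[-1]
--
--     return out_dir, out_name
-- ===== SOURCE B (Python) =====
-- def split_filename(input_name):
--     """Split a string containing a filename into two strings, one of the directory, and the
--     other of just the file's name (and extension)"""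
--     if "/" in input_name:
--         idx = input_name.rfind("/")
--         return input_name[:idx + 1], input_name[idx + 1:]
--     return ".", input_name
-- ===== Notes on version B (the rewrite author's own statement) =====
-- stated objective: idiomatic
-- what changed: B cuts the string once at the last '/' found by rfind (two slices, no token list and no rejoin loop) instead of splitting into all '/'-separated parts and concatenating them back with a loop.
import Mathlib
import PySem

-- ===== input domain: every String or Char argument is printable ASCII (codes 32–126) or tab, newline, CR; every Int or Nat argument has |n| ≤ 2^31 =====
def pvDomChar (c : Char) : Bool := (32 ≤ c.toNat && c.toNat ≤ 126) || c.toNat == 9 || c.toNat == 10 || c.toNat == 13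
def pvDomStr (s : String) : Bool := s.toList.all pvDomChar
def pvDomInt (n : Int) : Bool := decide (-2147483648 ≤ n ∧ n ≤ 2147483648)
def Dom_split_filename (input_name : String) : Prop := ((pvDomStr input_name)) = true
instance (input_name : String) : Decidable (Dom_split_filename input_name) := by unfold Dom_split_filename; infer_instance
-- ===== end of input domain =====

-- B replaces A's split-into-parts-then-rejoin loop with a single cut at the last '/' (rfind + two slices); same value on every input, no speed claim.

-- ===== PORT A =====
def split_filename (input_name : String) : String × String :=
  let parts := PySem.Chars.splitOn input_name.toList ['/']
  let out_dir : List Char :=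
    if parts.length = 1 then ['.']
    else (PySem.List.slice parts none (some (-1))).foldl (fun acc part => acc ++ part ++ ['/']) []
  -- parts[-1]: str.split always returns a nonempty list, so the default is unreachable
  let out_name := PySem.List.pyGetD parts (-1) []
  (String.ofList out_dir, String.ofList out_name)

-- ===== PORT B =====
def split_filename_alt (input_name : String) : String × String :=
  let s := input_name.toList
  if PySem.Chars.isIn ['/'] s then
    let idx := PySem.Chars.rfind s ['/']
    (String.ofList (PySem.List.slice s none (some (idx + 1))),
     String.ofList (PySem.List.slice s (some (idx + 1)) none))
  else
    (String.ofList ['.'], String.ofList s)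

-- ===== PRECONDITION & SPEC =====
def Spec_split_filename (input_name : String) (out : String × String) : Prop := out = split_filename_alt input_name
instance (input_name : String) (out : String × String) : Decidable (Spec_split_filename input_name out) := by unfold Spec_split_filename; infer_instance

-- ===== CLAIM (what is proved, stated in full; the proofs are below) =====
def Claim_equal_split_filename : Prop := ∀ (input_name : String), Dom_split_filename input_name → Spec_split_filename input_name (split_filename input_name)

-- ===== LEMMAS AND PROOFS =====

-- proof-side characterization of s.split(c) for a single-character separator
def splitChar (c : Char) : List Char → List (List Char)
  | [] => [[]]
  | a :: rest => if a = c then [] :: splitChar c rest else (splitChar c rest).modifyHead (a :: ·)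

theorem splitChar_ne_nil (c : Char) (l : List Char) : splitChar c l ≠ [] := by
  induction l with
  | nil => simp [splitChar]
  | cons a rest ih =>
    simp only [splitChar]
    split_ifs
    · simp
    · cases h : splitChar c rest with
      | nil => exact absurd h ih
      | cons x xs => simp

theorem isPrefixOf_singleton (c : Char) (l : List Char) :
    [c].isPrefixOf l = true ↔ l.head? = some c := by
  cases l with
  | nil => simp [List.isPrefixOf]
  | cons a rest => rw [List.isPrefixOf_iff_prefix]; simp [List.cons_prefix_cons, eq_comm]

theorem splitOn_go_eq (c : Char) :
    ∀ (fuel : Nat) (l cur : List Char) (acc : List (List Char)), l.length ≤ fuel →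
      PySem.Chars.splitOn.go [c] fuel l cur acc
        = acc.reverse ++ (splitChar c l).modifyHead (cur.reverse ++ ·) := by
  intro fuel
  induction fuel with
  | zero =>
    intro l cur acc h
    have : l = [] := List.length_eq_zero_iff.mp (Nat.le_zero.mp h)
    subst this
    simp [PySem.Chars.splitOn.go, splitChar]
  | succ fuel ih =>
    intro l cur acc h
    cases l with
    | nil =>
      rw [PySem.Chars.splitOn.go.eq_def]
      simp only [splitChar, List.modifyHead, List.reverse_cons, List.append_nil]
    | cons a rest =>
      rw [PySem.Chars.splitOn.go.eq_def]
      simp only []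
      by_cases hac : a = c
      · subst hac
        have hpre : [a].isPrefixOf (a :: rest) = true := by
          rw [isPrefixOf_singleton]; rfl
        rw [if_pos hpre]
        have hdrop : List.drop [a].length (a :: rest) = rest := rfl
        rw [hdrop]
        simp only [List.length_cons] at h
        rw [ih rest [] (cur.reverse :: acc) (Nat.le_of_succ_le_succ h)]
        simp only [splitChar, List.modifyHead, List.reverse_cons,
                   List.reverse_nil, List.nil_append, List.append_assoc]
        cases splitChar a rest <;> simp
      · have hpre : [c].isPrefixOf (a :: rest) = false := by
          rw [Bool.eq_false_iff, Ne, isPrefixOf_singleton]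
          simp [hac]
        rw [if_neg (by simp [hpre])]
        simp only [List.length_cons] at h
        rw [ih rest (a :: cur) acc (Nat.le_of_succ_le_succ h)]
        simp only [splitChar, if_neg hac]
        cases hsp : splitChar c rest with
        | nil => exact absurd hsp (splitChar_ne_nil c rest)
        | cons x xs => simp [List.modifyHead]

theorem splitOn_eq_splitChar (c : Char) (l : List Char) :
    PySem.Chars.splitOn l [c] = splitChar c l := by
  have h := splitOn_go_eq c (l.length + 1) l [] [] (by omega)
  rw [PySem.Chars.splitOn, h]
  cases hsp : splitChar c l with
  | nil => exact absurd hsp (splitChar_ne_nil c l)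
  | cons x xs => simp [List.modifyHead]

theorem splitChar_of_not_mem (c : Char) (l : List Char) (h : c ∉ l) : splitChar c l = [l] := by
  induction l with
  | nil => rfl
  | cons a rest ih =>
    simp only [List.mem_cons, not_or] at h
    simp [splitChar, Ne.symm, h.1, ih h.2, List.modifyHead]

theorem splitChar_append_last (c : Char) (t u : List Char) (hu : c ∉ u) :
    splitChar c (t ++ c :: u) = splitChar c t ++ [u] := by
  induction t with
  | nil => simp [splitChar, splitChar_of_not_mem c u hu]
  | cons a t' ih =>
    by_cases hac : a = c
    · subst hac; simp [splitChar, ih]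
    · simp only [List.cons_append, splitChar, if_neg hac, ih]
      cases hsp : splitChar c t' with
      | nil => exact absurd hsp (splitChar_ne_nil c t')
      | cons x xs => simp [List.modifyHead]

theorem flatten_splitChar (c : Char) (t : List Char) :
    ((splitChar c t).map (· ++ [c])).flatten = t ++ [c] := by
  induction t with
  | nil => simp [splitChar]
  | cons a t' ih =>
    by_cases hac : a = c
    · subst hac; simp [splitChar, ih]
    · simp only [splitChar, if_neg hac]
      cases hsp : splitChar c t' with
      | nil => exact absurd hsp (splitChar_ne_nil c t')
      | cons x xs =>
        rw [hsp] at ih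
        simpa [List.modifyHead] using ih

theorem foldl_append_sep (c : Char) (L : List (List Char)) :
    ∀ (init : List Char),
      L.foldl (fun acc part => acc ++ part ++ [c]) init = init ++ (L.map (· ++ [c])).flatten := by
  induction L with
  | nil => intro init; simp
  | cons x xs ih => intro init; rw [List.foldl_cons, ih]; simp

theorem rfind_go_last (c : Char) (t u : List Char) (hu : c ∉ u) :
    ∀ (k : Nat), t.length ≤ k → k ≤ (t ++ c :: u).length →
      PySem.Chars.rfind.go (t ++ c :: u) [c] k = (t.length : Int) := by
  intro k
  induction k with
  | zero =>
    intro h1 _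
    have ht : t = [] := List.length_eq_zero_iff.mp (Nat.le_zero.mp h1)
    subst ht
    rw [PySem.Chars.rfind.go.eq_def]
    simp
  | succ k ih =>
    intro h1 h2
    rw [PySem.Chars.rfind.go.eq_def]
    simp only []
    by_cases heq : t.length = k + 1
    · have hpre : [c].isPrefixOf (List.drop (k + 1) (t ++ c :: u)) = true := by
        rw [isPrefixOf_singleton, List.head?_drop, ← heq]
        simp
      rw [if_pos hpre, heq]
    · have hlt : t.length ≤ k := by omega
      have hpre : ¬ ([c].isPrefixOf (List.drop (k + 1) (t ++ c :: u)) = true) := by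
        rw [isPrefixOf_singleton, List.head?_drop]
        intro hsome
        have hidx : (t ++ c :: u)[k + 1]? = (c :: u)[k + 1 - t.length]? := by
          rw [List.getElem?_append_right (by omega)]
        rw [hidx] at hsome
        have hpos : 0 < k + 1 - t.length := by omega
        obtain ⟨m, hm⟩ : ∃ m, k + 1 - t.length = m + 1 := ⟨k - t.length, by omega⟩
        rw [hm] at hsome
        simp only [List.getElem?_cons_succ] at hsome
        exact hu (List.mem_of_getElem? hsome)
      rw [if_neg hpre]
      exact ih hlt (by omega)

theorem rfind_last (c : Char) (t u : List Char) (hu : c ∉ u) :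
    PySem.Chars.rfind (t ++ c :: u) [c] = (t.length : Int) := by
  unfold PySem.Chars.rfind
  exact rfind_go_last c t u hu _ (by simp) (le_refl _)

theorem exists_last_split (c : Char) (s : List Char) (h : c ∈ s) :
    ∃ t u, s = t ++ c :: u ∧ c ∉ u := by
  induction s with
  | nil => simp at h
  | cons a rest ih =>
    by_cases hr : c ∈ rest
    · obtain ⟨t, u, rfl, hu⟩ := ih hr
      exact ⟨a :: t, u, rfl, hu⟩
    · have hac : a = c := by
        rcases List.mem_cons.mp h with h' | h'
        · exact h'.symm
        · exact absurd h' hr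
      exact ⟨[], rest, by simp [hac], hr⟩

theorem pyGetD_concat_neg_one {α : Type} (l : List α) (x : α) (d : α) :
    PySem.List.pyGetD (l ++ [x]) (-1) d = x := by
  simp [PySem.List.pyGetD, PySem.List.pyGet?, PySem.List.pyIdx?]

-- ===== VERDICT (by name: the statement is the Claim_ definition above) =====
theorem split_filename_spec : Claim_equal_split_filename := by
  intro input_name _
  unfold Spec_split_filename split_filename split_filename_alt
  simp only [splitOn_eq_splitChar]
  by_cases hc : '/' ∈ input_name.toList
  · rw [if_pos ((PySem.Chars.isIn_iff_infix _ _).mpr ((List.singleton_infix_iff _ _).mpr hc))]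
    obtain ⟨t, u, hs, hu⟩ := exists_last_split '/' input_name.toList hc
    rw [hs, splitChar_append_last '/' t u hu, rfind_last '/' t u hu]
    have hne : (splitChar '/' t ++ [u]).length ≠ 1 := by
      cases hsp : splitChar '/' t with
      | nil => exact absurd hsp (splitChar_ne_nil '/' t)
      | cons x xs => simp
    rw [if_neg hne]
    have hcast : (t.length : Int) + 1 = ((t.length + 1 : Nat) : Int) := by push_cast; ring
    have htake : List.take (((t.length + 1 : Nat) : Int)).toNat (t ++ '/' :: u) = t ++ ['/'] := by
      rw [Int.toNat_natCast, show t ++ '/' :: u = (t ++ ['/']) ++ u by simp,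
          List.take_left' (by simp)]
    have hdrop : List.drop (((t.length + 1 : Nat) : Int)).toNat (t ++ '/' :: u) = u := by
      rw [Int.toNat_natCast, show t ++ '/' :: u = (t ++ ['/']) ++ u by simp,
          List.drop_left' (by simp)]
    rw [PySem.List.slice_to_neg_one, List.dropLast_concat, pyGetD_concat_neg_one,
        foldl_append_sep, flatten_splitChar, hcast,
        PySem.List.slice_to _ (by positivity), PySem.List.slice_from _ (by positivity),
        htake, hdrop]
    simp
  · have hisin : PySem.Chars.isIn ['/'] input_name.toList = false := by
      rw [Bool.eq_false_iff, Ne, PySem.Chars.isIn_iff_infix, List.singleton_infix_iff]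
      exact hc
    rw [splitChar_of_not_mem '/' _ hc, if_pos (show ([input_name.toList].length = 1) by simp), if_neg (by simp [hisin])]
    simp [PySem.List.pyGetD, PySem.List.pyGet?, PySem.List.pyIdx?]
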